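-- pv_equiv track=rewrite | github.com/ClementPinard/adventofcode | 2022/22/22.py | find_boundaries
-- ===== SOURCE A (Python) =====
-- def find_boundaries(data):
--     boundaries = []
--     for line in data:
--         line = "".join(line)
--         xmin, xmax = len(line), 0
--         if "." in line:
--             xmin, xmax = min(xmin, line.find(".")), max(xmax, line.rfind(".") + 1)
--         if "#" in line:
--             xmin, xmax = min(xmin, line.find("#")), max(xmax, line.rfind("#") + 1)
--         boundaries.append([xmin, xmax])
--     return boundaries
-- ===== SOURCE B (Python) =====
-- def find_boundaries(data):
--     boundaries = []
--     for line in data: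
--         line = "".join(line)
--         xmin, xmax = len(line), 0
--         for i, c in enumerate(line):
--             if c == "." or c == "#":
--                 if i < xmin:
--                     xmin = i
--                 if i + 1 > xmax:
--                     xmax = i + 1
--         boundaries.append([xmin, xmax])
--     return boundaries
-- ===== Notes on version B (the rewrite author's own statement) =====
-- stated objective: simpler
-- what changed: Replaces the two membership tests plus four find/rfind scans (up to six traversals per line) with a single enumerate pass that maintains xmin/xmax directly.
import Mathlib
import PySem

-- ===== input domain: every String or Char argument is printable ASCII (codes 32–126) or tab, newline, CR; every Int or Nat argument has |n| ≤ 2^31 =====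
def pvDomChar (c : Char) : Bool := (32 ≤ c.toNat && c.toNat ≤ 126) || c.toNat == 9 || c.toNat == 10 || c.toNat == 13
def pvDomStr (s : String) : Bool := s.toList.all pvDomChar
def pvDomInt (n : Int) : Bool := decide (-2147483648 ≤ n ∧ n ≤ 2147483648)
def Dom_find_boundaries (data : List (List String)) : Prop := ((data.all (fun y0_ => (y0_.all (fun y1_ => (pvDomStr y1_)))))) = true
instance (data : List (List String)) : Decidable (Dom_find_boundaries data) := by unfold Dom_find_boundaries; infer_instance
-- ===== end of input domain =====

-- B replaces A's membership tests plus find/rfind scans with one enumerate pass per line keeping xmin/xmax (simpler, same results).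


-- ===== PORT A =====
def find_boundaries (data : List (List String)) : List (List Int) :=
  data.foldl (fun boundaries line =>
    let s := PySem.Str.join "" line
    let xmin : Int := PySem.Str.len s
    let xmax : Int := 0
    let p1 : Int × Int :=
      if PySem.Str.isIn "." s then
        (min xmin (PySem.Str.find s "."), max xmax (PySem.Str.rfind s "." + 1))
      else (xmin, xmax)
    let p2 : Int × Int :=
      if PySem.Str.isIn "#" s then
        (min p1.1 (PySem.Str.find s "#"), max p1.2 (PySem.Str.rfind s "#" + 1))
      else p1
    boundaries ++ [[p2.1, p2.2]]) []

-- ===== PORT B =====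
def find_boundaries_alt (data : List (List String)) : List (List Int) :=
  data.foldl (fun boundaries line =>
    let s := PySem.Str.join "" line
    let p := (PySem.List.enumerate s.toList).foldl
      (fun (st : Int × Int) ic =>
        if ic.2 == '.' || ic.2 == '#' then
          (if ic.1 < st.1 then ic.1 else st.1, if ic.1 + 1 > st.2 then ic.1 + 1 else st.2)
        else st)
      (PySem.Str.len s, 0)
    boundaries ++ [[p.1, p.2]]) []

-- ===== PRECONDITION & SPEC =====
def Spec_find_boundaries (data : List (List String)) (out : List (List Int)) : Prop := out = find_boundaries_alt data
instance (data : List (List String)) (out : List (List Int)) : Decidable (Spec_find_boundaries data out) := by unfold Spec_find_boundaries; infer_instance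

-- ===== CLAIM (what is proved, stated in full; the proofs are below) =====
def Claim_equal_find_boundaries : Prop := ∀ (data : List (List String)), Dom_find_boundaries data → Spec_find_boundaries data (find_boundaries data)

-- ===== LEMMAS AND PROOFS =====

-- first index of c in cs, -1 if absent
def ffc (cs : List Char) (c : Char) : Int :=
  match cs with
  | [] => -1
  | a :: t => if a = c then 0 else (if ffc t c = -1 then -1 else ffc t c + 1)

-- last index of c in cs, -1 if absent
def lfc (cs : List Char) (c : Char) : Int :=
  match cs with
  | [] => -1
  | a :: t => if lfc t c = -1 then (if a = c then 0 else -1) else lfc t c + 1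

def tileC (c : Char) : Bool := c == '.' || c == '#'

-- first/last tile index, -1 if absent
def ftl (cs : List Char) : Int :=
  match cs with
  | [] => -1
  | a :: t => if tileC a then 0 else (if ftl t = -1 then -1 else ftl t + 1)

def ltl (cs : List Char) : Int :=
  match cs with
  | [] => -1
  | a :: t => if ltl t = -1 then (if tileC a then 0 else -1) else ltl t + 1

theorem ffc_ge (cs : List Char) (c : Char) : -1 ≤ ffc cs c := by
  induction cs with
  | nil => simp [ffc]
  | cons a t ih => simp only [ffc]; split_ifs <;> omega

theorem lfc_ge (cs : List Char) (c : Char) : -1 ≤ lfc cs c := by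
  induction cs with
  | nil => simp [lfc]
  | cons a t ih => simp only [lfc]; split_ifs <;> omega

theorem ftl_ge (cs : List Char) : -1 ≤ ftl cs := by
  induction cs with
  | nil => simp [ftl]
  | cons a t ih => simp only [ftl]; split_ifs <;> omega

theorem ltl_ge (cs : List Char) : -1 ≤ ltl cs := by
  induction cs with
  | nil => simp [ltl]
  | cons a t ih => simp only [ltl]; split_ifs <;> omega

theorem find_go_eq (c : Char) (cs : List Char) (k : Nat) :
    PySem.Chars.find.go [c] cs k = if ffc cs c = -1 then -1 else (k : Int) + ffc cs c := by
  induction cs generalizing k with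
  | nil => simp [PySem.Chars.find.go, ffc]
  | cons a t ih =>
    simp only [PySem.Chars.find.go, ffc, List.isPrefixOf]
    by_cases h : c = a
    · simp [h]
    · have : (c == a) = false := by simp [h]
      simp only [this, Bool.false_and, ih]
      have := ffc_ge t c
      split_ifs <;> simp_all <;> push_cast <;> omega

theorem find_eq_ffc (cs : List Char) (c : Char) : PySem.Chars.find cs [c] = ffc cs c := by
  have := ffc_ge cs c
  simp only [PySem.Chars.find, find_go_eq]
  split_ifs <;> omega

theorem lfc_snoc (xs : List Char) (a c : Char) :
    lfc (xs ++ [a]) c = if a = c then (xs.length : Int) else lfc xs c := by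
  induction xs with
  | nil => simp [lfc]
  | cons x t ih =>
    have h1 := lfc_ge (t ++ [a]) c
    have h2 := lfc_ge t c
    simp only [List.cons_append, lfc, ih, List.length_cons]
    split_ifs <;> simp_all <;> push_cast <;> omega

theorem rfind_go_eq (cs : List Char) (c : Char) (j : Nat) :
    PySem.Chars.rfind.go cs [c] j = lfc (cs.take (j + 1)) c := by
  induction j with
  | zero =>
    cases cs with
    | nil => simp [PySem.Chars.rfind.go, lfc, List.isPrefixOf]
    | cons a t =>
      simp only [PySem.Chars.rfind.go, List.take, List.isPrefixOf, lfc]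
      by_cases h : c = a
      · simp [h]
      · have : (c == a) = false := by simp [h]
        simp [this, Ne.symm h]
  | succ j ih =>
    simp only [PySem.Chars.rfind.go, ih]
    by_cases hlen : j + 1 < cs.length
    · have hget : cs.take (j + 1 + 1) = cs.take (j + 1) ++ [cs[j + 1]] := by
        rw [List.take_succ]
        simp [List.getElem?_eq_getElem hlen]
      by_cases hc : cs[j + 1] = c
      · have hpre : [c].isPrefixOf (List.drop (j + 1) cs) = true := by
          have : List.drop (j + 1) cs = cs[j + 1] :: List.drop (j + 2) cs :=
            List.drop_eq_getElem_cons hlen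
          simp [this, List.isPrefixOf, hc]
        rw [hget, lfc_snoc]
        simp [hpre, hc, List.length_take, Nat.min_eq_left (Nat.le_of_lt hlen)]
      · have hdrop : List.drop (j + 1) cs = cs[j + 1] :: List.drop (j + 2) cs :=
            List.drop_eq_getElem_cons hlen
        have hne : (c == cs[j + 1]) = false := by
          simp only [beq_eq_false_iff_ne, ne_eq]
          exact fun h => hc h.symm
        have hpre : [c].isPrefixOf (List.drop (j + 1) cs) = false := by
          rw [hdrop]
          simp [List.isPrefixOf, hne]
        rw [hget, lfc_snoc]
        simp [hpre, hc]
    · have h1 : cs.take (j + 1 + 1) = cs := List.take_of_length_le (by omega)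
      have h2 : cs.take (j + 1) = cs := List.take_of_length_le (by omega)
      have h3 : List.drop (j + 1) cs = [] := List.drop_of_length_le (by omega)
      simp [h1, h2, h3, List.isPrefixOf]

theorem rfind_eq_lfc (cs : List Char) (c : Char) : PySem.Chars.rfind cs [c] = lfc cs c := by
  cases cs with
  | nil => simp [PySem.Chars.rfind, PySem.Chars.rfind.go, lfc, List.isPrefixOf]
  | cons a t =>
    show PySem.Chars.rfind.go (a :: t) [c] (a :: t).length = _
    rw [List.length_cons, rfind_go_eq]
    rw [List.take_of_length_le (by simp)]

-- B's inner fold computed in closed form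
theorem fold_eq (cs : List Char) (k m M : Int) :
    (PySem.List.enumerate cs k).foldl
      (fun (st : Int × Int) ic =>
        if ic.2 == '.' || ic.2 == '#' then
          (if ic.1 < st.1 then ic.1 else st.1, if ic.1 + 1 > st.2 then ic.1 + 1 else st.2)
        else st) (m, M)
    = (if ftl cs = -1 then m else min m (k + ftl cs),
       if ltl cs = -1 then M else max M (k + ltl cs + 1)) := by
  induction cs generalizing k m M with
  | nil => simp [PySem.List.enumerate, ftl, ltl]
  | cons a t ih =>
    have hf := ftl_ge t
    have hl := ltl_ge t
    simp only [PySem.List.enumerate, List.foldl_cons]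
    by_cases ha : tileC a
    · have ha' : (a == '.' || a == '#') = true := ha
      simp only [ha', if_true, ih, ftl, ltl, ha]
      rw [Prod.mk.injEq]
      constructor <;> split_ifs <;> first | exact absurd ‹False› id | omega
    · have ha' : (a == '.' || a == '#') = false := by
        simpa [tileC] using ha
      simp only [ha', Bool.false_eq_true, ih, ftl, ltl, ha]
      rw [Prod.mk.injEq]
      constructor <;> split_ifs <;> first | exact absurd ‹False› id | omega

theorem ftl_eq (cs : List Char) :
    ftl cs = if ffc cs '.' = -1 then ffc cs '#'
             else if ffc cs '#' = -1 then ffc cs '.'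
             else min (ffc cs '.') (ffc cs '#') := by
  induction cs with
  | nil => simp [ftl, ffc]
  | cons a t ih =>
    have h1 := ffc_ge t '.'
    have h2 := ffc_ge t '#'
    by_cases hd : a = '.'
    · simp only [ftl, ffc, tileC, hd]
      norm_num
      split_ifs <;> first | exact absurd ‹False› id | omega
    · by_cases hh : a = '#'
      · simp only [ftl, ffc, tileC, hh]
        norm_num
        split_ifs <;> first | exact absurd ‹False› id | omega
      · have ht : tileC a = false := by simp [tileC, hd, hh]
        simp only [ftl, ffc, ht, hd, hh, Bool.false_eq_true, ih]
        split_ifs <;> first | exact absurd ‹False› id | omega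

theorem ltl_eq (cs : List Char) :
    ltl cs = if lfc cs '.' = -1 then lfc cs '#'
             else if lfc cs '#' = -1 then lfc cs '.'
             else max (lfc cs '.') (lfc cs '#') := by
  induction cs with
  | nil => simp [ltl, lfc]
  | cons a t ih =>
    have h1 := lfc_ge t '.'
    have h2 := lfc_ge t '#'
    have h3 := ltl_ge t
    by_cases hd : a = '.'
    · simp only [ltl, lfc, tileC, hd, ih]
      norm_num
      split_ifs <;> first | exact absurd ‹False› id | omega
    · by_cases hh : a = '#'
      · simp only [ltl, lfc, tileC, hh, ih]
        norm_num
        split_ifs <;> first | exact absurd ‹False› id | omega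
      · have ht : tileC a = false := by simp [tileC, hd, hh]
        simp only [ltl, lfc, ht, hd, hh, Bool.false_eq_true, ih]
        split_ifs <;> first | exact absurd ‹False› id | omega

theorem ffc_lfc_neg_one (cs : List Char) (c : Char) : ffc cs c = -1 ↔ lfc cs c = -1 := by
  induction cs with
  | nil => simp [ffc, lfc]
  | cons a t ih =>
    have := ffc_ge t c
    have := lfc_ge t c
    simp only [ffc, lfc]
    split_ifs <;> simp_all <;> omega

-- the per-line pair computations agree
theorem pair_eq (s : String) :
    (let xmin : Int := PySem.Str.len s
     let xmax : Int := 0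
     let p1 : Int × Int :=
       if PySem.Str.isIn "." s then
         (min xmin (PySem.Str.find s "."), max xmax (PySem.Str.rfind s "." + 1))
       else (xmin, xmax)
     let p2 : Int × Int :=
       if PySem.Str.isIn "#" s then
         (min p1.1 (PySem.Str.find s "#"), max p1.2 (PySem.Str.rfind s "#" + 1))
       else p1
     p2)
    = (PySem.List.enumerate s.toList).foldl
        (fun (st : Int × Int) ic =>
          if ic.2 == '.' || ic.2 == '#' then
            (if ic.1 < st.1 then ic.1 else st.1, if ic.1 + 1 > st.2 then ic.1 + 1 else st.2)
          else st)
        (PySem.Str.len s, 0) := by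
  have hdot : ".".toList = ['.'] := by decide
  have hhash : "#".toList = ['#'] := by decide
  rw [fold_eq]
  simp only [PySem.Str.len_eq, PySem.Str.isIn_eq, PySem.Str.find_eq, PySem.Str.rfind_eq,
    hdot, hhash]
  generalize s.toList = cs
  simp only [PySem.Chars.isIn, find_eq_ffc, rfind_eq_lfc, ftl_eq, ltl_eq, bne_iff_ne, ne_eq]
  have h1 := ffc_ge cs '.'
  have h2 := ffc_ge cs '#'
  have h3 := lfc_ge cs '.'
  have h4 := lfc_ge cs '#'
  have h5 : (ffc cs '.' = -1 ∧ lfc cs '.' = -1) ∨ (ffc cs '.' ≠ -1 ∧ lfc cs '.' ≠ -1) := by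
    have := ffc_lfc_neg_one cs '.'
    tauto
  have h6 : (ffc cs '#' = -1 ∧ lfc cs '#' = -1) ∨ (ffc cs '#' ≠ -1 ∧ lfc cs '#' ≠ -1) := by
    have := ffc_lfc_neg_one cs '#'
    tauto
  split_ifs <;>
    first
      | exact absurd ‹False› id
      | rfl
      | (simp only [Prod.mk.injEq]
         refine ⟨?_, ?_⟩ <;> (try split_ifs) <;> first | exact absurd ‹False› id | omega)

-- ===== VERDICT (by name: the statement is the Claim_ definition above) =====
theorem find_boundaries_spec : Claim_equal_find_boundaries := by
  unfold Claim_equal_find_boundaries Spec_find_boundaries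
  intro data _
  unfold find_boundaries find_boundaries_alt
  refine List.foldl_ext _ _ _ (fun acc line _ => ?_)
  have hp := pair_eq (PySem.Str.join "" line)
  simp only [] at hp ⊢
  rw [hp]
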